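-- pv_equiv track=rewrite | github.com/user28060/Alignment-of-schema-only-and-instance-only-data | src/schema_instance/schema_instance_gpt/rules.py | validate_assay_id_assays_both_0_30_ec_ev
-- ===== SOURCE A (Python) =====
-- def validate_assay_id_assays_both_0_30_ec_ev(values):
--     if not all(isinstance(value, int) for value in values):
--         return False
--
--     assays_both_0_30_ec_ev = [1, 2, 3, 4, 5]  # Sample dataset
--
--     for value in values:
--         if value not in assays_both_0_30_ec_ev:
--             return False
--
--     return True
-- ===== SOURCE B (Python) =====
-- def validate_assay_id_assays_both_0_30_ec_ev(values):
--     vals = list(values)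
--     if not all(isinstance(v, int) for v in vals):
--         return False
--     if not vals:
--         return True
--     # the allowed set is the contiguous range 1..5, so membership for all
--     # elements is equivalent to a bounds check on the extremes
--     return 1 <= min(vals) and max(vals) <= 5
-- ===== Notes on version B (the rewrite author's own statement) =====
-- stated objective: alternative
-- what changed: Replaces the per-element membership loop over the allowed list by a range characterisation: since the allowed values form the contiguous range 1..5, B checks that min(values) >= 1 and max(values) <= 5 (after the all-ints guard, empty list accepted), maintaining only the two extremes instead of testing each element's membership.
import Mathlib
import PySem

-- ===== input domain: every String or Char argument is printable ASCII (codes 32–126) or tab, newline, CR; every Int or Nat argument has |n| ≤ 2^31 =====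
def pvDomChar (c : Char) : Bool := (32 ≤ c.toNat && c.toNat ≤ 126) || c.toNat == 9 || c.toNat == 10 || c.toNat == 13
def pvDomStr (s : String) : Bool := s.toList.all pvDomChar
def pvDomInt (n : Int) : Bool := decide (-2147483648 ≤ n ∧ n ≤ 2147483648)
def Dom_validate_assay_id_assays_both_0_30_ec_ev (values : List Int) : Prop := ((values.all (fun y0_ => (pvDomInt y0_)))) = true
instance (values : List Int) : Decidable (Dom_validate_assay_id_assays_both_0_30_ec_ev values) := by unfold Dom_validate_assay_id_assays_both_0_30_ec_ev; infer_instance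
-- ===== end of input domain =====

-- B replaces A's per-element membership loop by a min/max bounds check (the allowed set is the contiguous range 1..5); objective: alternative.


-- ===== PORT A =====
-- the for-loop with early 'return False'
def pvLoopA : List Int → Bool
  | [] => true
  | v :: rest => if !(decide (v ∈ ([1, 2, 3, 4, 5] : List Int))) then false else pvLoopA rest

def validate_assay_id_assays_both_0_30_ec_ev (values : List Int) : Bool :=
  -- isinstance(value, int) is always true under the type convention (values : List Int)
  if !(values.all (fun _value => true)) then false
  else pvLoopA values

-- ===== PORT B =====
def validate_assay_id_assays_both_0_30_ec_ev_alt (values : List Int) : Bool :=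
  -- vals = list(values); all-ints guard is trivially true under the type convention
  if !(values.all (fun _v => true)) then false
  else if values = [] then true
  else
    match PySem.List.min? values (fun x => x), PySem.List.max? values (fun x => x) with
    | some m, some M => decide (1 ≤ m) && decide (M ≤ 5)
    | _, _ => false  -- unreachable: values ≠ []

-- ===== PRECONDITION & SPEC =====
def Spec_validate_assay_id_assays_both_0_30_ec_ev (values : List Int) (out : Bool) : Prop := out = validate_assay_id_assays_both_0_30_ec_ev_alt values
instance (values : List Int) (out : Bool) : Decidable (Spec_validate_assay_id_assays_both_0_30_ec_ev values out) := by unfold Spec_validate_assay_id_assays_both_0_30_ec_ev; infer_instance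

-- ===== CLAIM =====
def Claim_equal_validate_assay_id_assays_both_0_30_ec_ev : Prop := ∀ (values : List Int), Dom_validate_assay_id_assays_both_0_30_ec_ev values → Spec_validate_assay_id_assays_both_0_30_ec_ev values (validate_assay_id_assays_both_0_30_ec_ev values)

-- ===== LEMMAS AND PROOFS =====
theorem pvLoopA_eq_all (values : List Int) :
    pvLoopA values = values.all (fun v => decide (1 ≤ v ∧ v ≤ 5)) := by
  induction values with
  | nil => rfl
  | cons v rest ih =>
    simp only [pvLoopA, List.all_cons, ih]
    have hmem : (v ∈ ([1, 2, 3, 4, 5] : List Int)) ↔ (1 ≤ v ∧ v ≤ 5) := by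
      simp only [List.mem_cons, List.not_mem_nil, or_false]
      omega
    by_cases h : 1 ≤ v ∧ v ≤ 5
    · simp [hmem.mpr h, h]
    · simp [hmem, h]

-- ===== VERDICT =====
theorem validate_assay_id_assays_both_0_30_ec_ev_spec : Claim_equal_validate_assay_id_assays_both_0_30_ec_ev := by
  intro values _hdom
  unfold Spec_validate_assay_id_assays_both_0_30_ec_ev
  unfold validate_assay_id_assays_both_0_30_ec_ev validate_assay_id_assays_both_0_30_ec_ev_alt
  rw [pvLoopA_eq_all]
  have hguard : (values.all (fun _v => true)) = true := by simp
  rw [hguard]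
  simp only [Bool.not_true, Bool.false_eq_true, if_false]
  cases hvals : values with
  | nil => simp
  | cons x t =>
    rcases hm : PySem.List.min? (x :: t) (fun y => y) with _ | m
    · exact absurd hm (by simp [PySem.List.min?_eq_none_iff])
    rcases hM : PySem.List.max? (x :: t) (fun y => y) with _ | M
    · exact absurd hM (by simp [PySem.List.max?_eq_none_iff])
    simp only [reduceCtorEq, ite_false]
    by_cases h : ∀ v ∈ (x :: t : List Int), 1 ≤ v ∧ v ≤ 5
    · have h1 : (1 : Int) ≤ m := (h m (PySem.List.min?_mem hm)).1
      have h2 : M ≤ (5 : Int) := (h M (PySem.List.max?_mem hM)).2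
      have hall : ((x :: t : List Int).all (fun v => decide (1 ≤ v ∧ v ≤ 5))) = true := by
        simp only [List.all_eq_true]
        intro v hv
        simpa using h v hv
      rw [hall]
      simp [h1, h2]
    · obtain ⟨v, hv, hbad⟩ : ∃ v ∈ (x :: t : List Int), ¬ (1 ≤ v ∧ v ≤ 5) := by
        by_contra hc
        exact h (fun v hv => by_contra (fun hb => hc ⟨v, hv, hb⟩))
      have hall : ((x :: t : List Int).all (fun v => decide (1 ≤ v ∧ v ≤ 5))) = false := by
        simp only [List.all_eq_false]
        exact ⟨v, hv, by simpa using hbad⟩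
      rw [hall]
      have hmv := PySem.List.min?_isMin hm v hv
      have hMv := PySem.List.max?_isMax hM v hv
      have hnot : ¬ (1 ≤ m ∧ M ≤ 5) := by
        rintro ⟨h1, h2⟩
        exact hbad ⟨le_trans h1 hmv, le_trans hMv h2⟩
      by_cases h1 : (1 : Int) ≤ m
      · have h2 : ¬ M ≤ (5 : Int) := fun h2 => hnot ⟨h1, h2⟩
        simp [h2]
      · simp [h1]
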